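-- pv_equiv track=rewrite | github.com/LYH-YF/MWPToolkit | mwptoolkit/utils/preprocess_tools.py | joint_number_
-- ===== SOURCE A (Python) =====
-- def joint_number_(text_list):  # match longer fraction such as ( 1 / 1000000 )
--     new_list = []
--     i = 0
--     while i < len(text_list):
--         if text_list[i] == '(':
--             try:
--                 j = text_list[i:].index(')')
--                 if i + 1 == i + j:
--                     j = None
--                 if "(" in text_list[i + 1:i + j + 1]:
--                     j = None
--             except:
--                 j = None
--             if j:
--                 stack = []
--                 flag = True
--                 idx = 0
--                 for temp_idx, word in enumerate(text_list[i:i + j + 1]):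
--                     if word in ["(", ")", "/"] or word.isdigit():
--                         stack.append(word)
--                         idx = temp_idx
--                     else:
--                         flag = False
--                         break
--                 if flag:
--                     number = ''.join(stack)
--                     new_list.append(number)
--                 else:
--                     for word in stack:
--                         new_list.append(word)
--                 i += idx + 1
--             else:
--                 new_list.append(text_list[i])
--                 i += 1
--         else:
--             new_list.append(text_list[i])
--             i += 1
--     return new_list
-- ===== SOURCE B (Python) =====
-- def joint_number_(text_list):
--     # One left-to-right pass: at '(', walk forward over '/' and digit tokens;
--     # if that walk is non-empty and stops exactly at ')', emit the joined group.
--     out = []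
--     n = len(text_list)
--     i = 0
--     while i < n:
--         tok = text_list[i]
--         if tok == '(':
--             k = i + 1
--             while k < n and (text_list[k] == '/' or text_list[k].isdigit()):
--                 k += 1
--             if k > i + 1 and k < n and text_list[k] == ')':
--                 out.append(''.join(text_list[i:k + 1]))
--                 i = k + 1
--                 continue
--         out.append(tok)
--         i += 1
--     return out
-- ===== Notes on version B (the rewrite author's own statement) =====
-- stated objective: alternative
-- what changed: Instead of slicing the list and running .index(')'), a substring membership test and an enumerate scan at every '(', B does one left-to-right pass that walks over '/'-or-digit tokens after a '(' and joins the group iff that walk stops at ')'; no slices or index rescans (measured ~1.3x on generated inputs, below the 1.5x bar, so no speed claim).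
import Mathlib
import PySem

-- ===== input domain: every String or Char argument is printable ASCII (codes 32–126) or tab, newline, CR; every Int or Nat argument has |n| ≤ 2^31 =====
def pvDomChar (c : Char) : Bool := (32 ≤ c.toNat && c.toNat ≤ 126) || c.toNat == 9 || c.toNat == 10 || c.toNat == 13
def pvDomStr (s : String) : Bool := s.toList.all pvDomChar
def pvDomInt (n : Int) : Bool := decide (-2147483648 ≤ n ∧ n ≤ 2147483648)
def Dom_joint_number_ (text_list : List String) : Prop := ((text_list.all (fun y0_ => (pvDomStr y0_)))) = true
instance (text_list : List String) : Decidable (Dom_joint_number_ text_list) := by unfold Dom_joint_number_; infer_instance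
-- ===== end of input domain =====

-- B replaces A's per-'(' slicing, .index(')') and membership rescans by one forward pass; return value proved equal on all inputs.

-- ===== PORT A =====
-- word in ["(", ")", "/"] or word.isdigit()
def pvPassA (w : String) : Bool := w == "(" || w == ")" || w == "/" || PySem.Str.strIsdigit w

-- the 'for temp_idx, word in enumerate(...)' loop with state (stack, flag, idx); temp_idx is the second argument
def pvScanA : List String → Nat → (List String × Bool × Nat) → (List String × Bool × Nat)
  | [], _, st => st
  | w :: ws, t, (stack, flag, idx) =>
    if pvPassA w then pvScanA ws (t + 1) (stack ++ [w], flag, t)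
    else (stack, false, idx)

-- the while loop of A; 'i' and the accumulated new_list
def pvALoop (text_list : List String) (i : Nat) (acc : List String) : List String :=
  if h : i < text_list.length then
    if text_list[i] = "(" then
      let j? : Option Nat :=
        match PySem.List.index? (PySem.List.slice text_list (some ((i : Nat) : Int)) none) ")" with
        | none => none
        | some j =>
          if i + 1 = i + j then none
          else if "(" ∈ PySem.List.slice text_list (some (((i + 1 : Nat)) : Int)) (some (((i + j + 1 : Nat)) : Int)) then none
          else some j
      match j? with
      | some j =>
        if j = 0 then  -- Python 'if j:' is false for j == 0
          pvALoop text_list (i + 1) (acc ++ [text_list[i]])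
        else
          let st := pvScanA (PySem.List.slice text_list (some (((i : Nat)) : Int)) (some (((i + j + 1 : Nat)) : Int))) 0 ([], true, 0)
          let acc' := if st.2.1 then acc ++ [PySem.Str.join "" st.1] else acc ++ st.1
          pvALoop text_list (i + st.2.2 + 1) acc'
      | none => pvALoop text_list (i + 1) (acc ++ [text_list[i]])
    else pvALoop text_list (i + 1) (acc ++ [text_list[i]])
  else acc
termination_by text_list.length - i
decreasing_by all_goals omega

def joint_number_ (text_list : List String) : List String := pvALoop text_list 0 []

-- ===== PORT B =====
-- text_list[k] == '/' or text_list[k].isdigit()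
def pvSimpleB (w : String) : Bool := w == "/" || PySem.Str.strIsdigit w

-- the inner 'while k < n and ...' walk of B
def pvBWalk (text_list : List String) (k : Nat) : Nat :=
  if h : k < text_list.length then
    if pvSimpleB text_list[k] then pvBWalk text_list (k + 1) else k
  else k
termination_by text_list.length - k
decreasing_by omega

-- the main while loop of B
def pvBLoop (text_list : List String) (i : Nat) (acc : List String) : List String :=
  if h : i < text_list.length then
    if text_list[i] = "(" then
      let k := pvBWalk text_list (i + 1)
      if hc : i + 1 < k ∧ k < text_list.length ∧ text_list[k]? = some ")" then
        pvBLoop text_list (k + 1)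
          (acc ++ [PySem.Str.join "" (PySem.List.slice text_list (some (((i : Nat)) : Int)) (some (((k + 1 : Nat)) : Int)))])
      else pvBLoop text_list (i + 1) (acc ++ [text_list[i]])
    else pvBLoop text_list (i + 1) (acc ++ [text_list[i]])
  else acc
termination_by text_list.length - i
decreasing_by all_goals omega

def joint_number__alt (text_list : List String) : List String := pvBLoop text_list 0 []

-- ===== PRECONDITION & SPEC =====
def Spec_joint_number_ (text_list : List String) (out : List String) : Prop := out = joint_number__alt text_list
instance (text_list : List String) (out : List String) : Decidable (Spec_joint_number_ text_list out) := by unfold Spec_joint_number_; infer_instance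

-- ===== CLAIM (what is proved, stated in full; the proofs are below) =====
def Claim_equal_joint_number_ : Prop := ∀ (text_list : List String), Dom_joint_number_ text_list → Spec_joint_number_ text_list (joint_number_ text_list)

-- ===== LEMMAS AND PROOFS =====

lemma pvBWalk_ge (tl : List String) (k : Nat) : k ≤ pvBWalk tl k := by
  fun_induction pvBWalk tl k <;> omega

lemma pvBWalk_le (tl : List String) (k : Nat) (h : k ≤ tl.length) : pvBWalk tl k ≤ tl.length := by
  fun_induction pvBWalk tl k <;> omega

lemma pvBWalk_mid (tl : List String) (k m : Nat) (hm : k ≤ m) (hlt : m < pvBWalk tl k) :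
    ∃ h : m < tl.length, pvSimpleB tl[m] = true := by
  fun_induction pvBWalk tl k with
  | case1 k hk hs ih =>
    rcases Nat.eq_or_lt_of_le hm with rfl | h'
    · exact ⟨hk, hs⟩
    · exact ih h' hlt
  | case2 k hk hs => omega
  | case3 k hk => omega

lemma pvBWalk_stop (tl : List String) (k : Nat) (hw : pvBWalk tl k < tl.length) (hk : k ≤ pvBWalk tl k) :
    pvSimpleB tl[pvBWalk tl k] = false := by
  fun_induction pvBWalk tl k with
  | case1 k hk hs ih => exact ih hw (pvBWalk_ge tl (k+1))
  | case2 k hk hs => simpa using hs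
  | case3 k hk => omega

-- scan over a segment where every word passes the filter
lemma pvScanA_all (seg : List String) (hall : ∀ w ∈ seg, pvPassA w = true) :
    ∀ t stack flag idx, pvScanA seg t (stack, flag, idx) =
      (stack ++ seg, flag, if seg.length = 0 then idx else t + (seg.length - 1)) := by
  induction seg with
  | nil => intro t stack flag idx; simp [pvScanA]
  | cons w ws ih =>
    intro t stack flag idx
    have hw : pvPassA w = true := hall w (by simp)
    rw [pvScanA, hw, if_pos rfl]
    rw [ih (fun x hx => hall x (by simp [hx]))]
    cases ws with
    | nil => simp
    | cons b bs => simp; omega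

-- scan that fails at the first bad word
lemma pvScanA_fail (pre : List String) (bad : String) (rest : List String)
    (hall : ∀ w ∈ pre, pvPassA w = true) (hbad : pvPassA bad = false) :
    ∀ t stack flag idx, pvScanA (pre ++ bad :: rest) t (stack, flag, idx) =
      (stack ++ pre, false, if pre.length = 0 then idx else t + (pre.length - 1)) := by
  induction pre with
  | nil => intro t stack flag idx; simp [pvScanA, hbad]
  | cons p ps ih =>
    intro t stack flag idx
    have hp : pvPassA p = true := hall p (by simp)
    rw [List.cons_append, pvScanA, hp, if_pos rfl]
    rw [ih (fun x hx => hall x (by simp [hx]))]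
    cases ps with
    | nil => simp
    | cons b bs => simp; omega

-- B steps one-by-one through a block of non-'(' tokens
lemma pvBLoop_steps (tl : List String) (a b : Nat) (hab : a ≤ b)
    (hmid : ∀ m, a ≤ m → m < b → ∃ h : m < tl.length, tl[m] ≠ "(") :
    ∀ acc, pvBLoop tl a acc = pvBLoop tl b (acc ++ (tl.drop a).take (b - a)) := by
  obtain ⟨d, hd⟩ : ∃ d, b - a = d := ⟨b - a, rfl⟩
  induction d generalizing a with
  | zero =>
    intro acc
    have hab' : a = b := by omega
    subst hab'
    simp
  | succ n ih =>
    intro acc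
    have ha : a < b := by omega
    obtain ⟨hlt, hne⟩ := hmid a le_rfl ha
    rw [pvBLoop, dif_pos hlt, if_neg hne]
    rw [ih (a + 1) (by omega) (fun m hm hb => hmid m (by omega) hb) (by omega) (acc ++ [tl[a]])]
    congr 1
    rw [List.append_assoc]
    congr 1
    rw [List.drop_eq_getElem_cons hlt]
    have hba : b - a = (b - (a + 1)) + 1 := by omega
    rw [hba, List.take_succ_cons]
    simp


lemma pvSimpleB_pass (s : String) (h : pvSimpleB s = true) : pvPassA s = true := by
  simp only [pvSimpleB, Bool.or_eq_true] at h
  simp only [pvPassA, Bool.or_eq_true]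
  tauto

lemma pvSimpleB_ne (s : String) (h : pvSimpleB s = true) : s ≠ "(" ∧ s ≠ ")" := by
  constructor <;> rintro rfl <;> revert h <;> decide

lemma pvPassA_false (s : String) (h1 : s ≠ "(") (h2 : s ≠ ")") (h3 : pvSimpleB s = false) :
    pvPassA s = false := by
  simp only [pvSimpleB, Bool.or_eq_false_iff, beq_eq_false_iff_ne] at h3
  simp only [pvPassA, Bool.or_eq_false_iff, beq_eq_false_iff_ne]
  exact ⟨⟨⟨h1, h2⟩, h3.1⟩, h3.2⟩

lemma pv_mem_take_drop (tl : List String) (a k : Nat) (x : String) :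
    x ∈ (tl.drop a).take k ↔ ∃ m, m < k ∧ ∃ h : a + m < tl.length, tl[a + m] = x := by
  constructor
  · intro hx
    obtain ⟨m, hm, heq⟩ := List.getElem_of_mem hx
    have hm' : m < k ∧ a + m < tl.length := by
      simp [List.length_take, List.length_drop] at hm; omega
    refine ⟨m, hm'.1, hm'.2, ?_⟩
    rw [← heq, List.getElem_take, List.getElem_drop]
  · rintro ⟨m, hmk, hlen, heq⟩
    rw [List.mem_iff_getElem]
    refine ⟨m, by simp [List.length_take, List.length_drop]; omega, ?_⟩
    rw [List.getElem_take, List.getElem_drop, heq]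

lemma pv_getElem_congr (tl : List String) {a b : Nat} (h : a = b) (ha : a < tl.length) :
    tl[a] = tl[b]'(h ▸ ha) := by subst h; rfl

lemma pv_main (tl : List String) : ∀ d i acc, tl.length - i ≤ d → pvALoop tl i acc = pvBLoop tl i acc := by
  intro d
  induction d with
  | zero =>
    intro i acc hd
    rw [pvALoop, pvBLoop, dif_neg (by omega), dif_neg (by omega)]
  | succ d ih =>
    intro i acc hd
    by_cases h : i < tl.length
    · rw [pvALoop, pvBLoop, dif_pos h, dif_pos h]
      by_cases htok : tl[i] = "("
      · rw [if_pos htok, if_pos htok]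
        have hw1 : i + 1 ≤ pvBWalk tl (i + 1) := pvBWalk_ge tl (i + 1)
        have hw2 : pvBWalk tl (i + 1) ≤ tl.length := pvBWalk_le tl (i + 1) (by omega)
        set w := pvBWalk tl (i + 1) with hwdef
        rw [PySem.List.slice_from_natCast]
        by_cases hjoin : i + 1 < w ∧ w < tl.length ∧ tl[w]? = some ")"
        · obtain ⟨hj1, hj2, hj3⟩ := hjoin
          have hrp : tl[w] = ")" := (List.getElem?_eq_some_iff.mp hj3).2
          have hmid : ∀ m, i + 1 ≤ m → m < w → ∃ hm : m < tl.length, pvSimpleB tl[m] = true :=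
            fun m hm hlt => pvBWalk_mid tl (i + 1) m hm (hwdef ▸ hlt)
          have hidx : PySem.List.index? (tl.drop i) ")" = some (w - i) := by
            rw [PySem.List.index?_eq_some_iff]
            refine ⟨(tl.drop i).take (w - i), tl.drop (w + 1), ?_, ?_, ?_⟩
            · conv_lhs => rw [(List.take_append_drop (w - i) (tl.drop i)).symm]
              congr 1
              rw [List.drop_drop, show i + (w - i) = w from by omega,
                List.drop_eq_getElem_cons hj2, hrp]
            · simp only [List.length_take, List.length_drop]; omega
            · intro hmem
              rw [pv_mem_take_drop] at hmem
              obtain ⟨m, hmk, hlen, heq⟩ := hmem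
              rcases Nat.eq_zero_or_pos m with rfl | hpos
              · rw [pv_getElem_congr tl (show i + 0 = i from by omega) hlen, htok] at heq
                exact absurd heq (by decide)
              · obtain ⟨hm2, hs⟩ := hmid (i + m) (by omega) (by omega)
                exact (pvSimpleB_ne _ hs).2 heq
          rw [hidx]
          simp only []
          rw [if_neg (show ¬ (i + 1 = i + (w - i)) from by omega)]
          have hparen : "(" ∉ PySem.List.slice tl (some ((i + 1 : Nat) : Int)) (some ((i + (w - i) + 1 : Nat) : Int)) := by
            rw [PySem.List.slice_natCast, show i + (w - i) + 1 - (i + 1) = w - i from by omega,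
              pv_mem_take_drop]
            rintro ⟨m, hmk, hlen, heq⟩
            by_cases hm : i + 1 + m = w
            · rw [pv_getElem_congr tl hm hlen, hrp] at heq
              exact absurd heq (by decide)
            · obtain ⟨_, hs⟩ := hmid (i + 1 + m) (by omega) (by omega)
              exact (pvSimpleB_ne _ hs).1 heq
          rw [if_neg hparen]
          split
          next j hjj =>
            injection hjj with hjj'
            subst hjj'
            rw [if_neg (show ¬ (w - i = 0) from by omega)]
            rw [show ((i + (w - i) + 1 : Nat)) = w + 1 from by omega]
            have hseg : PySem.List.slice tl (some ((i : Nat) : Int)) (some ((w + 1 : Nat) : Int)) = (tl.drop i).take (w - i + 1) := by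
              rw [PySem.List.slice_natCast, show w + 1 - i = w - i + 1 from by omega]
            rw [hseg]
            have hall : ∀ x ∈ (tl.drop i).take (w - i + 1), pvPassA x = true := by
              intro x hx
              rw [pv_mem_take_drop] at hx
              obtain ⟨m, hmk, hlen, heq⟩ := hx
              subst heq
              rcases Nat.eq_zero_or_pos m with rfl | hpos
              · rw [pv_getElem_congr tl (show i + 0 = i from by omega) hlen, htok]; decide
              · by_cases hm : i + m = w
                · rw [pv_getElem_congr tl hm hlen, hrp]; decide
                · obtain ⟨_, hs⟩ := hmid (i + m) (by omega) (by omega)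
                  exact pvSimpleB_pass _ hs
            rw [pvScanA_all _ hall]
            have hlen : ((tl.drop i).take (w - i + 1)).length = w - i + 1 := by
              simp only [List.length_take, List.length_drop]; omega
            rw [hlen]
            rw [if_neg (show ¬ (w - i + 1 = 0) from by omega)]
            simp only [List.nil_append]
            rw [dif_pos ⟨hj1, hj2, hj3⟩]
            rw [show i + (0 + (w - i + 1 - 1)) + 1 = w + 1 from by omega, if_pos trivial]
            exact ih (w + 1) _ (by omega)
          next hjj => exact absurd hjj (by simp)
        · rw [dif_neg hjoin]
          have hmid : ∀ m, i + 1 ≤ m → m < w → ∃ hm : m < tl.length, pvSimpleB tl[m] = true :=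
            fun m hm hlt => pvBWalk_mid tl (i + 1) m hm (hwdef ▸ hlt)
          cases hidx : PySem.List.index? (tl.drop i) ")" with
          | none =>
            simp only []
            exact ih (i + 1) _ (by omega)
          | some j =>
            obtain ⟨hjlt, hjval, hjfirst⟩ := PySem.List.getElem_of_index?_eq_some hidx
            have hjlen : i + j < tl.length := by simp only [List.length_drop] at hjlt; omega
            rw [List.getElem_drop] at hjval
            have hj0 : j ≠ 0 := by
              intro h0
              subst h0
              rw [pv_getElem_congr tl (show i + 0 = i from by omega) hjlen, htok] at hjval
              exact absurd hjval (by decide)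
            simp only []
            by_cases hj1 : i + 1 = i + j
            · rw [if_pos hj1]
              simp only []
              exact ih (i + 1) _ (by omega)
            · rw [if_neg hj1]
              by_cases hparen : "(" ∈ PySem.List.slice tl (some ((i + 1 : Nat) : Int)) (some ((i + j + 1 : Nat) : Int))
              · rw [if_pos hparen]
                simp only []
                exact ih (i + 1) _ (by omega)
              · rw [if_neg hparen]
                have hnop : ∀ m, i + 1 ≤ m → m ≤ i + j → ∀ hm : m < tl.length, tl[m] ≠ "(" := by
                  intro m hm1 hm2 hm hcontra
                  apply hparen
                  rw [PySem.List.slice_natCast, show i + j + 1 - (i + 1) = j from by omega,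
                    pv_mem_take_drop]
                  refine ⟨m - (i + 1), by omega, by omega, ?_⟩
                  rw [pv_getElem_congr tl (show i + 1 + (m - (i + 1)) = m from by omega)]
                  exact hcontra
                have hfirst : ∀ m, i ≤ m → m < i + j → ∀ hm : m < tl.length, tl[m] ≠ ")" := by
                  intro m hm1 hm2 hm hc
                  apply hjfirst (m - i) (by omega)
                  rw [List.getElem_drop, pv_getElem_congr tl (show i + (m - i) = m from by omega)]
                  exact hc
                have hwj : w < i + j := by
                  rcases Nat.lt_trichotomy w (i + j) with hlt | heq | hgt
                  · exact hlt
                  · exfalso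
                    apply hjoin
                    refine ⟨by omega, by omega, ?_⟩
                    rw [List.getElem?_eq_some_iff]
                    exact ⟨by omega, by rw [pv_getElem_congr tl heq]; exact hjval⟩
                  · exfalso
                    obtain ⟨_, hs⟩ := hmid (i + j) (by omega) hgt
                    rw [hjval] at hs
                    exact absurd hs (by decide)
                have hwlt : w < tl.length := by omega
                have hbadns : pvSimpleB tl[w] = false :=
                  pvBWalk_stop tl (i + 1) (by rw [← hwdef]; exact hwlt) (by rw [← hwdef]; exact hw1)
                have hbad2 : tl[w] ≠ "(" := hnop w hw1 (by omega) hwlt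
                have hbad1 : tl[w] ≠ ")" := hfirst w (by omega) hwj hwlt
                have hbadpass : pvPassA tl[w] = false := pvPassA_false _ hbad2 hbad1 hbadns
                have hseg : PySem.List.slice tl (some ((i : Nat) : Int)) (some ((i + j + 1 : Nat) : Int)) =
                    (tl.drop i).take (w - i) ++ tl[w] :: ((tl.drop (w + 1)).take (i + j - w)) := by
                  rw [PySem.List.slice_natCast,
                    show i + j + 1 - i = (w - i) + (i + j + 1 - w) from by omega, List.take_add]
                  congr 1
                  rw [List.drop_drop, show i + (w - i) = w from by omega,
                    List.drop_eq_getElem_cons hwlt,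
                    show i + j + 1 - w = (i + j - w) + 1 from by omega, List.take_succ_cons]
                have hallpre : ∀ x ∈ (tl.drop i).take (w - i), pvPassA x = true := by
                  intro x hx
                  rw [pv_mem_take_drop] at hx
                  obtain ⟨m, hmk, hlen, heq⟩ := hx
                  subst heq
                  rcases Nat.eq_zero_or_pos m with rfl | hpos
                  · rw [pv_getElem_congr tl (show i + 0 = i from by omega) hlen, htok]; decide
                  · obtain ⟨_, hs⟩ := hmid (i + m) (by omega) (by omega)
                    exact pvSimpleB_pass _ hs
                split
                next j' hjj =>
                  injection hjj with hjj'
                  subst hjj'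
                  rw [if_neg hj0]
                  rw [hseg, pvScanA_fail _ _ _ hallpre hbadpass]
                  have hlenpre : ((tl.drop i).take (w - i)).length = w - i := by
                    simp only [List.length_take, List.length_drop]; omega
                  rw [hlenpre, if_neg (show ¬ (w - i = 0) from by omega)]
                  simp only [List.nil_append]
                  rw [if_neg (show ¬ (false = true) from by simp)]
                  rw [show i + (0 + (w - i - 1)) + 1 = w from by omega]
                  rw [pvBLoop_steps tl (i + 1) w (by omega)
                    (fun m hm1 hm2 => ⟨(hmid m hm1 hm2).1, (pvSimpleB_ne _ (hmid m hm1 hm2).2).1⟩)]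
                  have haccs : acc ++ [tl[i]] ++ (tl.drop (i + 1)).take (w - (i + 1)) = acc ++ (tl.drop i).take (w - i) := by
                    rw [List.append_assoc]
                    congr 1
                    rw [List.drop_eq_getElem_cons h, show w - i = (w - (i + 1)) + 1 from by omega,
                      List.take_succ_cons]
                    simp
                  rw [haccs]
                  exact ih w _ (by omega)
                next hjj => exact absurd hjj (by simp)
      · rw [if_neg htok, if_neg htok]
        exact ih (i + 1) _ (by omega)
    · rw [pvALoop, pvBLoop, dif_neg h, dif_neg h]

-- ===== VERDICT (by name: the statement is the Claim_ definition above) =====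
theorem joint_number__spec : Claim_equal_joint_number_ := by
  intro tl _
  unfold Spec_joint_number_ joint_number_ joint_number__alt
  exact pv_main tl tl.length 0 [] (by omega)
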